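-- pv_equiv track=rewrite | github.com/kevin820606/aoc2022 | src/day9.py | is_needed_move
-- ===== SOURCE A (Python) =====
-- from typing import NamedTuple
--
-- class Coordinate(NamedTuple):
--     x: int
--     y: int
--
-- def is_needed_move(
--     former_node_position: Coordinate, latter_node_position: Coordinate
-- ) -> bool:
--     latter_x, latter_y = latter_node_position
--     latter_surround: list[Coordinate] = [
--         Coordinate(x=latter_x + x_move, y=latter_y + y_move)
--         for x_move in range(-1, 2)
--         for y_move in range(-1, 2)
--     ]
--     return not former_node_position in latter_surround
-- ===== SOURCE B (Python) =====
-- def is_needed_move(former_node_position, latter_node_position):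
--     fx, fy = former_node_position
--     lx, ly = latter_node_position
--     return abs(fx - lx) > 1 or abs(fy - ly) > 1
-- ===== Notes on version B (the rewrite author's own statement) =====
-- stated objective: simpler
-- what changed: Replaced building the 9-element neighbour list and a membership scan with a closed-form Chebyshev-distance check abs(dx)>1 or abs(dy)>1.
import Mathlib
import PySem

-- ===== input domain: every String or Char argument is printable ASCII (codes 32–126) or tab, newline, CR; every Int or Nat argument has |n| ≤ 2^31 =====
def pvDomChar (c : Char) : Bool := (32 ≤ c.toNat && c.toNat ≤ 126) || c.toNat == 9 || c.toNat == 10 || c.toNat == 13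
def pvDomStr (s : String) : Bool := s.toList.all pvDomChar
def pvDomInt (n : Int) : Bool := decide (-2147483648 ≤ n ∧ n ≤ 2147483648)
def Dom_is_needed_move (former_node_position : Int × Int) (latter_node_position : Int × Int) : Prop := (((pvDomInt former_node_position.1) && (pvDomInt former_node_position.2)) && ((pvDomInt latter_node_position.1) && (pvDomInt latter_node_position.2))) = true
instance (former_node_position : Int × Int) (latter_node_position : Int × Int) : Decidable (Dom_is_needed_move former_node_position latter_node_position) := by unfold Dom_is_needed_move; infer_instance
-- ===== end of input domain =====

-- B replaces A's 9-element neighbour list + membership test with a closed-form Chebyshev-distance check (objective: simpler).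


-- ===== PORT A =====
-- Port of A: list comprehension over range(-1,2) × range(-1,2), then membership test.
def is_needed_move (former_node_position : Int × Int) (latter_node_position : Int × Int) : Bool :=
  let latter_x := latter_node_position.1
  let latter_y := latter_node_position.2
  let latter_surround : List (Int × Int) :=
    (PySem.List.pyRange (-1) 2 1).flatMap (fun x_move =>
      (PySem.List.pyRange (-1) 2 1).map (fun y_move =>
        (latter_x + x_move, latter_y + y_move)))
  !(latter_surround.contains former_node_position)

-- ===== PORT B =====
-- Port of B: closed-form Chebyshev-distance check.
def is_needed_move_alt (former_node_position : Int × Int) (latter_node_position : Int × Int) : Bool :=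
  let fx := former_node_position.1
  let fy := former_node_position.2
  let lx := latter_node_position.1
  let ly := latter_node_position.2
  decide ((fx - lx).natAbs > 1) || decide ((fy - ly).natAbs > 1)

-- ===== PRECONDITION & SPEC =====
def Spec_is_needed_move (former_node_position : Int × Int) (latter_node_position : Int × Int) (out : Bool) : Prop := out = is_needed_move_alt former_node_position latter_node_position
instance (former_node_position : Int × Int) (latter_node_position : Int × Int) (out : Bool) : Decidable (Spec_is_needed_move former_node_position latter_node_position out) := by unfold Spec_is_needed_move; infer_instance

-- ===== CLAIM (what is proved, stated in full; the proofs are below) =====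
def Claim_equal_is_needed_move : Prop := ∀ (former_node_position : Int × Int) (latter_node_position : Int × Int), Dom_is_needed_move former_node_position latter_node_position → Spec_is_needed_move former_node_position latter_node_position (is_needed_move former_node_position latter_node_position)

-- ===== LEMMAS AND PROOFS =====

-- ===== VERDICT (by name: the statement is the Claim_ definition above) =====
theorem is_needed_move_spec : Claim_equal_is_needed_move := by
  intro f l _
  rcases f with ⟨fx, fy⟩
  rcases l with ⟨lx, ly⟩
  unfold Spec_is_needed_move is_needed_move is_needed_move_alt
  rw [show PySem.List.pyRange (-1) 2 1 = [-1, 0, 1] from by decide]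
  simp only [List.flatMap_cons, List.flatMap_nil, List.map_cons, List.map_nil,
    List.cons_append, List.nil_append, List.append_nil,
    List.contains_eq_mem, ← decide_not, ← Bool.decide_or, decide_eq_decide,
    List.mem_cons, List.not_mem_nil, Prod.mk.injEq, or_false, gt_iff_lt]
  omega
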